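-- pv_equiv track=rewrite | github.com/nervan-iwnl/project-euler-solutions | 001-100/p098/solution.py | make_mapping
-- ===== SOURCE A (Python) =====
-- def make_mapping(word, num):
--     s = str(num)
--     if len(word) != len(s):
--         return None
--     if s[0] == '0':
--         return None
--
--     letter_to_digit = {}
--     digit_to_letter = {}
--
--     for ch, d in zip(word, s):
--         if ch in letter_to_digit:
--             if letter_to_digit[ch] != d:
--                 return None
--         else:
--             letter_to_digit[ch] = d
--
--         if d in digit_to_letter:
--             if digit_to_letter[d] != ch:
--                 return None
--         else:
--             digit_to_letter[d] = ch
--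
--     if letter_to_digit[word[0]] == '0':
--         return None
--
--     return letter_to_digit
-- ===== SOURCE B (Python) =====
-- def make_mapping(word, num):
--     s = str(num)
--     if len(word) != len(s) or s[0] == '0':
--         return None
--     m = dict(zip(word, s))
--     if len(set(m.values())) != len(m):
--         return None
--     if any(m[ch] != d for ch, d in zip(word, s)):
--         return None
--     if m[word[0]] == '0':
--         return None
--     return m
-- ===== Notes on version B (the rewrite author's own statement) =====
-- stated objective: simpler
-- what changed: A maintains two dicts incrementally (letter->digit and a reverse digit->letter dict) with per-step consistency checks; B builds the mapping in one shot with dict(zip(word, s)) and replaces the reverse dict by whole-list checks: distinct values via len(set(m.values())) and consistency via one any() pass.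
import Mathlib
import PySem

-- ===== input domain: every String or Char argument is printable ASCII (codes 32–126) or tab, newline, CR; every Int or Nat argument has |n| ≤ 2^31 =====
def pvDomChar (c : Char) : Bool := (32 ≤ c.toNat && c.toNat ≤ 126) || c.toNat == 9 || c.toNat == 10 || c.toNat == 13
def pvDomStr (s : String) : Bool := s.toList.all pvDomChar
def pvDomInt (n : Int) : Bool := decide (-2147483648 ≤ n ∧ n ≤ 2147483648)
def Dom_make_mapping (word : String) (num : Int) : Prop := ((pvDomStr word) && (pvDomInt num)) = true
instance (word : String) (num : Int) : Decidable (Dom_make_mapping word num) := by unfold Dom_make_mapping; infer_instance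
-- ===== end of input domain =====

-- B replaces A's incremental two-dict loop by one dict built in one shot (dict(zip)) plus
-- whole-list distinctness/consistency checks; objective: simpler (not measurably faster).

-- ===== PORT A =====
-- the for-loop of A over zip(word, s), maintaining letter_to_digit (ltd) and digit_to_letter (dtl)
def pvAloop : List (String × String) → PySem.Dict String String → PySem.Dict String String →
    Option (PySem.Dict String String)
  | [], ltd, _ => some ltd
  | p :: rest, ltd, dtl =>
    match ltd.get? p.1 with
    | some v =>
      if v ≠ p.2 then none
      else
        match dtl.get? p.2 with
        | some c => if c ≠ p.1 then none else pvAloop rest ltd dtl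
        | none => pvAloop rest ltd (dtl.insert p.2 p.1)
    | none =>
      match dtl.get? p.2 with
      | some c => if c ≠ p.1 then none else pvAloop rest (ltd.insert p.1 p.2) dtl
      | none => pvAloop rest (ltd.insert p.1 p.2) (dtl.insert p.2 p.1)

def make_mapping (word : String) (num : Int) : Option (List (String × String)) :=
  let s := PySem.Int.toChars num
  let w := word.toList
  if w.length ≠ s.length then none
  else if PySem.List.pyGet? s 0 = some '0' then none
  else
    -- zip(word, s): a list of pairs of one-character strings
    let ps := (w.zip s).map (fun p => (String.ofList [p.1], String.ofList [p.2]))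
    match pvAloop ps PySem.Dict.empty PySem.Dict.empty with
    | none => none
    | some ltd =>
      match PySem.List.pyGet? w 0 with
      | none => none  -- unreachable: here len(word) = len(str(num)) ≥ 1
      | some c0 =>
        match ltd.get? (String.ofList [c0]) with
        | none => none  -- unreachable KeyError: word[0] was inserted by the loop
        | some v => if v = "0" then none else some ltd.items

-- ===== PORT B =====
def make_mapping_alt (word : String) (num : Int) : Option (List (String × String)) :=
  let s := PySem.Int.toChars num
  let w := word.toList
  if w.length ≠ s.length ∨ PySem.List.pyGet? s 0 = some '0' then none
  else
    let ps := (w.zip s).map (fun p => (String.ofList [p.1], String.ofList [p.2]))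
    let m := ps.foldl (fun d p => d.insert p.1 p.2) PySem.Dict.empty      -- dict(zip(word, s))
    if (PySem.Set.ofList m.values).length ≠ m.size then none              -- len(set(m.values())) != len(m)
    else if ps.any (fun p => !(m.get? p.1 == some p.2)) then none         -- any(m[ch] != d …)
    else
      match PySem.List.pyGet? w 0 with
      | none => none  -- unreachable: here len(word) = len(str(num)) ≥ 1
      | some c0 => if m.getD (String.ofList [c0]) "" = "0" then none else some m.items

-- ===== PRECONDITION & SPEC =====
def Spec_make_mapping (word : String) (num : Int) (out : Option (List (String × String))) : Prop := out = make_mapping_alt word num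
instance (word : String) (num : Int) (out : Option (List (String × String))) : Decidable (Spec_make_mapping word num out) := by unfold Spec_make_mapping; infer_instance

-- ===== CLAIM (what is proved, stated in full; the proofs are below) =====
def Claim_equal_make_mapping : Prop := ∀ (word : String) (num : Int), Dom_make_mapping word num → Spec_make_mapping word num (make_mapping word num)

-- ===== LEMMAS AND PROOFS =====

-- the two dicts of A's loop are mutually inverse
def pvInv (ltd dtl : PySem.Dict String String) : Prop :=
  ∀ k v, ltd.get? k = some v ↔ dtl.get? v = some k

-- the pending pairs are compatible with the dicts built so far
def pvOkL (ltd : PySem.Dict String String) (ps : List (String × String)) : Prop :=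
  ∀ p ∈ ps, ltd.get? p.1 = none ∨ ltd.get? p.1 = some p.2
def pvOkD (dtl : PySem.Dict String String) (ps : List (String × String)) : Prop :=
  ∀ p ∈ ps, dtl.get? p.2 = none ∨ dtl.get? p.2 = some p.1
-- the pair list describes a function (resp. an injective one)
def pvFun (ps : List (String × String)) : Prop := ∀ p ∈ ps, ∀ q ∈ ps, p.1 = q.1 → p.2 = q.2
def pvInj (ps : List (String × String)) : Prop := ∀ p ∈ ps, ∀ q ∈ ps, p.2 = q.2 → p.1 = q.1
def pvGood (ltd dtl : PySem.Dict String String) (ps : List (String × String)) : Prop :=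
  pvOkL ltd ps ∧ pvOkD dtl ps ∧ pvFun ps ∧ pvInj ps

-- first-occurrence extension of a dict (what A's loop builds)
def pvFirst (ltd : PySem.Dict String String) (ps : List (String × String)) : PySem.Dict String String :=
  ps.foldl (fun d p => if d.contains p.1 then d else d.insert p.1 p.2) ltd
-- last-write extension of a dict (what dict(zip) builds)
def pvLast (d : PySem.Dict String String) (ps : List (String × String)) : PySem.Dict String String :=
  ps.foldl (fun d p => d.insert p.1 p.2) d

theorem pvInv_insert {ltd dtl : PySem.Dict String String} (h : pvInv ltd dtl) {a b : String}
    (ha : ltd.get? a = none) (hb : dtl.get? b = none) :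
    pvInv (ltd.insert a b) (dtl.insert b a) := by
  intro k v
  rw [PySem.Dict.get?_insert, PySem.Dict.get?_insert]
  by_cases hk : k = a <;> by_cases hv : v = b
  · subst hk; subst hv; simp
  · subst hk
    rw [if_pos rfl, if_neg hv]
    constructor
    · intro hbv
      exact absurd (Option.some.inj hbv).symm hv
    · intro hd
      have := (h k v).mpr hd
      rw [ha] at this; cases this
  · subst hv
    rw [if_neg hk, if_pos rfl]
    constructor
    · intro hl
      have := (h k v).mp hl
      rw [hb] at this; cases this
    · intro hak
      exact absurd (Option.some.inj hak).symm hk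
  · rw [if_neg hk, if_neg hv]
    exact h k v

theorem pvGood_tail {ltd dtl : PySem.Dict String String} {p : String × String}
    {rest : List (String × String)} (h : pvGood ltd dtl (p :: rest)) : pvGood ltd dtl rest := by
  obtain ⟨h1, h2, h3, h4⟩ := h
  exact ⟨fun q hq => h1 q (List.mem_cons_of_mem _ hq),
         fun q hq => h2 q (List.mem_cons_of_mem _ hq),
         fun q hq r hr => h3 q (List.mem_cons_of_mem _ hq) r (List.mem_cons_of_mem _ hr),
         fun q hq r hr => h4 q (List.mem_cons_of_mem _ hq) r (List.mem_cons_of_mem _ hr)⟩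

theorem pvGood_insert {ltd dtl : PySem.Dict String String} {p : String × String}
    {rest : List (String × String)} (h : pvGood ltd dtl (p :: rest))
    (ha : ltd.get? p.1 = none) (hb : dtl.get? p.2 = none) :
    pvGood (ltd.insert p.1 p.2) (dtl.insert p.2 p.1) rest := by
  obtain ⟨h1, h2, h3, h4⟩ := h
  refine ⟨?_, ?_, pvGood_tail ⟨h1, h2, h3, h4⟩ |>.2.2.1, pvGood_tail ⟨h1, h2, h3, h4⟩ |>.2.2.2⟩
  · intro q hq
    rw [PySem.Dict.get?_insert]
    by_cases hqp : q.1 = p.1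
    · right
      rw [if_pos hqp,
        h3 p (List.mem_cons_self ..) q (List.mem_cons_of_mem _ hq) hqp.symm]
    · rw [if_neg hqp]
      exact h1 q (List.mem_cons_of_mem _ hq)
  · intro q hq
    rw [PySem.Dict.get?_insert]
    by_cases hqp : q.2 = p.2
    · right
      rw [if_pos hqp,
        h4 p (List.mem_cons_self ..) q (List.mem_cons_of_mem _ hq) hqp.symm]
    · rw [if_neg hqp]
      exact h2 q (List.mem_cons_of_mem _ hq)

theorem pvGood_cons_of_mem {ltd dtl : PySem.Dict String String} {p : String × String}
    {rest : List (String × String)} (h : pvGood ltd dtl rest)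
    (ha : ltd.get? p.1 = some p.2) (hb : dtl.get? p.2 = some p.1) :
    pvGood ltd dtl (p :: rest) := by
  obtain ⟨h1, h2, h3, h4⟩ := h
  have keyL : ∀ q ∈ rest, q.1 = p.1 → q.2 = p.2 := by
    intro q hq hqp
    rcases h1 q hq with hn | hs
    · rw [hqp, ha] at hn; cases hn
    · rw [hqp, ha] at hs; exact (Option.some.inj hs).symm
  have keyD : ∀ q ∈ rest, q.2 = p.2 → q.1 = p.1 := by
    intro q hq hqp
    rcases h2 q hq with hn | hs
    · rw [hqp, hb] at hn; cases hn
    · rw [hqp, hb] at hs; exact (Option.some.inj hs).symm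
  refine ⟨?_, ?_, ?_, ?_⟩
  · intro q hq
    rcases List.mem_cons.mp hq with rfl | hq'
    · exact Or.inr ha
    · exact h1 q hq'
  · intro q hq
    rcases List.mem_cons.mp hq with rfl | hq'
    · exact Or.inr hb
    · exact h2 q hq'
  · intro q hq r hr hqr
    rcases List.mem_cons.mp hq with rfl | hq' <;> rcases List.mem_cons.mp hr with rfl | hr'
    · rfl
    · exact (keyL r hr' hqr.symm).symm
    · exact keyL q hq' hqr
    · exact h3 q hq' r hr' hqr
  · intro q hq r hr hqr
    rcases List.mem_cons.mp hq with rfl | hq' <;> rcases List.mem_cons.mp hr with rfl | hr'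
    · rfl
    · exact (keyD r hr' hqr.symm).symm
    · exact keyD q hq' hqr
    · exact h4 q hq' r hr' hqr

theorem pvGood_cons_of_fresh {ltd dtl : PySem.Dict String String} {p : String × String}
    {rest : List (String × String)}
    (h : pvGood (ltd.insert p.1 p.2) (dtl.insert p.2 p.1) rest)
    (ha : ltd.get? p.1 = none) (hb : dtl.get? p.2 = none) :
    pvGood ltd dtl (p :: rest) := by
  obtain ⟨h1, h2, h3, h4⟩ := h
  have keyL : ∀ q ∈ rest, q.1 = p.1 → q.2 = p.2 := by
    intro q hq hqp
    rcases h1 q hq with hn | hs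
    · rw [hqp, PySem.Dict.get?_insert_self] at hn; cases hn
    · rw [hqp, PySem.Dict.get?_insert_self] at hs; exact (Option.some.inj hs).symm
  have keyD : ∀ q ∈ rest, q.2 = p.2 → q.1 = p.1 := by
    intro q hq hqp
    rcases h2 q hq with hn | hs
    · rw [hqp, PySem.Dict.get?_insert_self] at hn; cases hn
    · rw [hqp, PySem.Dict.get?_insert_self] at hs; exact (Option.some.inj hs).symm
  refine ⟨?_, ?_, ?_, ?_⟩
  · intro q hq
    rcases List.mem_cons.mp hq with rfl | hq'
    · exact Or.inl ha
    · by_cases hqp : q.1 = p.1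
      · exact Or.inl (hqp ▸ ha)
      · rcases h1 q hq' with hn | hs
        · rw [PySem.Dict.get?_insert, if_neg hqp] at hn; exact Or.inl hn
        · rw [PySem.Dict.get?_insert, if_neg hqp] at hs; exact Or.inr hs
  · intro q hq
    rcases List.mem_cons.mp hq with rfl | hq'
    · exact Or.inl hb
    · by_cases hqp : q.2 = p.2
      · exact Or.inl (hqp ▸ hb)
      · rcases h2 q hq' with hn | hs
        · rw [PySem.Dict.get?_insert, if_neg hqp] at hn; exact Or.inl hn
        · rw [PySem.Dict.get?_insert, if_neg hqp] at hs; exact Or.inr hs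
  · intro q hq r hr hqr
    rcases List.mem_cons.mp hq with rfl | hq' <;> rcases List.mem_cons.mp hr with rfl | hr'
    · rfl
    · exact (keyL r hr' hqr.symm).symm
    · exact keyL q hq' hqr
    · exact h3 q hq' r hr' hqr
  · intro q hq r hr hqr
    rcases List.mem_cons.mp hq with rfl | hq' <;> rcases List.mem_cons.mp hr with rfl | hr'
    · rfl
    · exact (keyD r hr' hqr.symm).symm
    · exact keyD q hq' hqr
    · exact h4 q hq' r hr' hqr

theorem pvFirst_cons_contains {ltd : PySem.Dict String String} {p : String × String}
    {rest : List (String × String)} {v : String} (h : ltd.get? p.1 = some v) :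
    pvFirst ltd (p :: rest) = pvFirst ltd rest := by
  simp only [pvFirst, List.foldl_cons, PySem.Dict.contains_eq_isSome_get?, h,
    Option.isSome_some, if_true]

theorem pvFirst_cons_fresh {ltd : PySem.Dict String String} {p : String × String}
    {rest : List (String × String)} (h : ltd.get? p.1 = none) :
    pvFirst ltd (p :: rest) = pvFirst (ltd.insert p.1 p.2) rest := by
  simp only [pvFirst, List.foldl_cons, PySem.Dict.contains_eq_isSome_get?, h,
    Option.isSome_none, Bool.false_eq_true, if_false]

theorem pvAloop_some {ps : List (String × String)} :
    ∀ {ltd dtl}, pvInv ltd dtl → pvGood ltd dtl ps →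
    pvAloop ps ltd dtl = some (pvFirst ltd ps) := by
  induction ps with
  | nil => intro ltd dtl _ _; rfl
  | cons p rest ih =>
    intro ltd dtl hinv hg
    rcases hg.1 p (List.mem_cons_self ..) with hL | hL
    · have hD : dtl.get? p.2 = none := by
        cases hD : dtl.get? p.2 with
        | none => rfl
        | some c =>
          rcases hg.2.1 p (List.mem_cons_self ..) with hn | hs
          · rw [hD] at hn; cases hn
          · have := (hinv p.1 p.2).mpr hs
            rw [hL] at this; cases this
      simp only [pvAloop, hL, hD]
      rw [pvFirst_cons_fresh hL]
      exact ih (pvInv_insert hinv hL hD) (pvGood_insert hg hL hD)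
    · have hD : dtl.get? p.2 = some p.1 := (hinv p.1 p.2).mp hL
      simp [pvAloop, hL, hD]
      rw [pvFirst_cons_contains hL]
      exact ih hinv (pvGood_tail hg)

theorem pvAloop_good {ps : List (String × String)} :
    ∀ {ltd dtl r}, pvInv ltd dtl → pvAloop ps ltd dtl = some r → pvGood ltd dtl ps := by
  induction ps with
  | nil =>
    intro ltd dtl r _ _
    exact ⟨fun q hq => absurd hq (List.not_mem_nil), fun q hq => absurd hq (List.not_mem_nil),
           fun q hq => absurd hq (List.not_mem_nil), fun q hq => absurd hq (List.not_mem_nil)⟩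
  | cons p rest ih =>
    intro ltd dtl r hinv heq
    simp only [pvAloop] at heq
    cases hL : ltd.get? p.1 with
    | some v =>
      simp only [hL] at heq
      by_cases hv : v = p.2
      · subst hv
        have hD : dtl.get? p.2 = some p.1 := (hinv p.1 p.2).mp hL
        simp only [hD, ne_eq, not_true_eq_false, if_false] at heq
        exact pvGood_cons_of_mem (ih hinv heq) hL hD
      · rw [if_pos hv] at heq; cases heq
    | none =>
      simp only [hL] at heq
      cases hD : dtl.get? p.2 with
      | some c =>
        simp only [hD] at heq
        by_cases hc : c = p.1
        · subst hc
          have := (hinv p.1 p.2).mpr hD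
          rw [hL] at this; cases this
        · rw [if_pos hc] at heq; cases heq
      | none =>
        simp only [hD] at heq
        exact pvGood_cons_of_fresh (ih (pvInv_insert hinv hL hD) heq) hL hD

-- last-write lookup is stable under later writes of the same value
theorem pvLast_stable {ps : List (String × String)} :
    ∀ {d k v}, d.get? k = some v → (∀ q ∈ ps, q.1 = k → q.2 = v) →
    (pvLast d ps).get? k = some v := by
  induction ps with
  | nil => intro d k v h _; exact h
  | cons q rest ih =>
    intro d k v h hq
    simp only [pvLast, List.foldl_cons]
    apply ih
    · rw [PySem.Dict.get?_insert]
      by_cases hk : k = q.1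
      · rw [if_pos hk, hq q (List.mem_cons_self ..) hk.symm]
      · rw [if_neg hk]; exact h
    · intro r hr hrk
      exact hq r (List.mem_cons_of_mem _ hr) hrk

-- under pvFun, every pair is found in the final dict
theorem pvLast_get {ps : List (String × String)} :
    ∀ {d}, pvFun ps → ∀ p ∈ ps, (pvLast d ps).get? p.1 = some p.2 := by
  induction ps with
  | nil => intro d _ p hp; cases hp
  | cons q rest ih =>
    intro d hf p hp
    rcases List.mem_cons.mp hp with rfl | hp'
    · simp only [pvLast, List.foldl_cons]
      exact pvLast_stable (PySem.Dict.get?_insert_self ..)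
        (fun r hr h1 => hf r (List.mem_cons_of_mem _ hr) p (List.mem_cons_self ..) h1)
    · exact ih (fun a ha b hb => hf a (List.mem_cons_of_mem _ ha) b (List.mem_cons_of_mem _ hb)) p hp'

theorem pvLast_mem {ps : List (String × String)} :
    ∀ {d k v}, (pvLast d ps).get? k = some v → (k, v) ∈ ps ∨ d.get? k = some v := by
  induction ps with
  | nil => intro d k v h; exact Or.inr h
  | cons q rest ih =>
    intro d k v h
    rcases ih h with hm | hd
    · exact Or.inl (List.mem_cons_of_mem _ hm)
    · rw [PySem.Dict.get?_insert] at hd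
      by_cases hk : k = q.1
      · rw [if_pos hk] at hd
        left
        have hv : v = q.2 := (Option.some.inj hd).symm
        subst hv; subst hk
        simp
      · rw [if_neg hk] at hd
        exact Or.inr hd

theorem pvLast_nodup_keys {ps : List (String × String)} {d : PySem.Dict String String}
    (h : d.keys.Nodup) : (pvLast d ps).keys.Nodup :=
  PySem.Dict.nodup_keys_foldl_insert_key ps Prod.fst (fun _ p => p.2) d h

-- re-inserting the value a key already has is a no-op
theorem pvInsert_noop {d : PySem.Dict String String} {k v : String}
    (hnd : d.keys.Nodup) (h : d.get? k = some v) : d.insert k v = d := by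
  apply PySem.Dict.ext
  have hc : d.contains k = true := by
    rw [PySem.Dict.contains_eq_isSome_get?, h]; rfl
  rw [PySem.Dict.items_insert_of_contains _ _ hc]
  conv_rhs => rw [← List.map_id d.items]
  apply List.map_congr_left
  intro p hp
  simp only [id_eq]
  by_cases hpk : p.1 = k
  · have hkp : (k, p.2) = p := by rw [← hpk]
    have h2 : d.get? k = some p.2 := PySem.Dict.get?_of_mem_items _ (by rw [hkp]; exact hp) hnd
    have hv : v = p.2 := by rw [h] at h2; exact Option.some.inj h2
    rw [if_pos (show (p.1 == k) = true by simp [hpk]), hv]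
    exact hkp
  · simp [hpk]

-- under pvFun, last-write and first-occurrence builds agree
theorem pvLast_eq_pvFirst {ps : List (String × String)} :
    ∀ {d}, d.keys.Nodup → (∀ p ∈ ps, ∀ v, d.get? p.1 = some v → v = p.2) → pvFun ps →
    pvLast d ps = pvFirst d ps := by
  induction ps with
  | nil => intro d _ _ _; rfl
  | cons q rest ih =>
    intro d hnd hagree hf
    cases hg : d.get? q.1 with
    | some v0 =>
      have hv0 : v0 = q.2 := hagree q (List.mem_cons_self ..) v0 hg
      subst hv0
      rw [pvFirst_cons_contains hg]
      simp only [pvLast, List.foldl_cons, pvInsert_noop hnd hg]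
      exact ih hnd (fun p hp v hv => hagree p (List.mem_cons_of_mem _ hp) v hv)
        (fun a ha b hb => hf a (List.mem_cons_of_mem _ ha) b (List.mem_cons_of_mem _ hb))
    | none =>
      rw [pvFirst_cons_fresh hg]
      simp only [pvLast, List.foldl_cons]
      apply ih (PySem.Dict.nodup_keys_insert _ _ _ hnd)
      · intro p hp v hv
        rw [PySem.Dict.get?_insert] at hv
        by_cases hpq : p.1 = q.1
        · rw [if_pos hpq] at hv
          rw [← Option.some.inj hv]
          exact hf q (List.mem_cons_self ..) p (List.mem_cons_of_mem _ hp) hpq.symm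
        · rw [if_neg hpq] at hv
          exact hagree p (List.mem_cons_of_mem _ hp) v hv
      · exact fun a ha b hb => hf a (List.mem_cons_of_mem _ ha) b (List.mem_cons_of_mem _ hb)

theorem pvAdd_aux : ∀ (l s : List String), ∃ t, t.Sublist l ∧ List.foldl PySem.Set.add s l = s ++ t := by
  intro l
  induction l with
  | nil => intro s; exact ⟨[], List.nil_sublist _, by simp⟩
  | cons x xs ih =>
    intro s
    simp only [List.foldl_cons, PySem.Set.add]
    by_cases hc : PySem.Set.contains s x = true
    · obtain ⟨t, ht, he⟩ := ih s
      exact ⟨t, ht.cons _, by rw [if_pos hc]; exact he⟩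
    · obtain ⟨t, ht, he⟩ := ih (s ++ [x])
      refine ⟨x :: t, ht.cons₂ _, ?_⟩
      rw [if_neg hc, he, List.append_assoc]
      rfl

-- Set.ofList is a subsequence of its input
theorem pvOfList_sublist {l : List String} : List.Sublist (PySem.Set.ofList l) l := by
  obtain ⟨t, ht, he⟩ := pvAdd_aux l []
  rw [PySem.Set.ofList_eq_foldl, he]
  simpa using ht

theorem pvOfList_len_iff {l : List String} : (PySem.Set.ofList l).length = l.length ↔ l.Nodup := by
  constructor
  · intro h
    have := pvOfList_sublist (l := l) |>.eq_of_length h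
    rw [← this]
    exact PySem.Set.nodup_ofList l
  · intro h
    rw [PySem.Set.ofList_eq_self_of_nodup l h]

-- under pvFun, the values of dict(zip ps) are distinct iff ps is injective
theorem pvValues_nodup_iff {ps : List (String × String)} (hf : pvFun ps) :
    (pvLast PySem.Dict.empty ps).values.Nodup ↔ pvInj ps := by
  have hnd : (pvLast PySem.Dict.empty ps).keys.Nodup := pvLast_nodup_keys PySem.Dict.nodup_keys_empty
  have hitems : ∀ p : String × String, p ∈ ps → (p.1, p.2) ∈ (pvLast PySem.Dict.empty ps).items := by
    intro p hp
    exact ((PySem.Dict.get?_eq_some_iff_mem_items _ _ _ hnd).mp (pvLast_get hf p hp))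
  have hmemps : ∀ q : String × String, q ∈ (pvLast PySem.Dict.empty ps).items → q ∈ ps := by
    intro q hq
    have := PySem.Dict.get?_of_mem_items _ hq hnd
    rcases pvLast_mem this with hm | hd
    · exact hm
    · rw [PySem.Dict.get?_empty] at hd; cases hd
  have hval : (pvLast PySem.Dict.empty ps).values = (pvLast PySem.Dict.empty ps).items.map Prod.snd := by
    simp [PySem.Dict.values]
  have hkey : (pvLast PySem.Dict.empty ps).keys = (pvLast PySem.Dict.empty ps).items.map Prod.fst := by
    simp [PySem.Dict.keys]
  constructor
  · intro hv p hp q hq hpq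
    rw [hval] at hv
    have h1 := hitems p hp
    have h2 := hitems q hq
    have := List.inj_on_of_nodup_map hv h1 h2 (by simpa using hpq)
    exact congrArg Prod.fst this
  · intro hinj
    rw [hval]
    apply List.Nodup.map_on
    · intro x hx y hy hxy
      have hx' := hmemps x hx
      have hy' := hmemps y hy
      have := hinj x hx' y hy' hxy
      exact Prod.ext this hxy
    · rw [hkey] at hnd
      exact hnd.of_map

theorem pvMain : ∀ (word : String) (num : Int), make_mapping word num = make_mapping_alt word num := by
  intro word num
  by_cases hlen : word.length = (PySem.Int.toChars num).length
  case neg => simp [make_mapping, make_mapping_alt, hlen]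
  by_cases h0 : PySem.List.pyGet? (PySem.Int.toChars num) 0 = some '0'
  case pos => simp [make_mapping, make_mapping_alt, hlen, h0]
  · have hlenL : word.toList.length = (PySem.Int.toChars num).length := by
      simpa using hlen
    have hinv : pvInv PySem.Dict.empty PySem.Dict.empty := by
        intro k v
        simp [PySem.Dict.get?_empty]
    simp only [make_mapping, make_mapping_alt, if_neg (not_not.mpr hlenL), if_neg h0,
        if_neg (show ¬(word.toList.length ≠ (PySem.Int.toChars num).length ∨
          PySem.List.pyGet? (PySem.Int.toChars num) 0 = some '0') from
          not_or.mpr ⟨not_not.mpr hlenL, h0⟩)]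
    set ps := ((word.toList.zip (PySem.Int.toChars num)).map
      (fun p => (String.ofList [p.1], String.ofList [p.2]))) with hps
    have hm : ps.foldl (fun d p => d.insert p.1 p.2) PySem.Dict.empty = pvLast PySem.Dict.empty ps := rfl
    rw [hm]
    have hvs : (pvLast PySem.Dict.empty ps).values.length = (pvLast PySem.Dict.empty ps).size := by
      simp [PySem.Dict.values, PySem.Dict.size]
    by_cases hf : pvFun ps
    · by_cases hj : pvInj ps
      · -- consistent and injective: both return the dict
        have hgood : pvGood PySem.Dict.empty PySem.Dict.empty ps :=
          ⟨fun q _ => Or.inl (PySem.Dict.get?_empty _), fun q _ => Or.inl (PySem.Dict.get?_empty _), hf, hj⟩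
        rw [pvAloop_some hinv hgood]
        have hfl : pvLast PySem.Dict.empty ps = pvFirst PySem.Dict.empty ps :=
          pvLast_eq_pvFirst PySem.Dict.nodup_keys_empty
            (fun p _ v hv => by rw [PySem.Dict.get?_empty] at hv; cases hv) hf
        rw [← hfl]
        have hvnd : (pvLast PySem.Dict.empty ps).values.Nodup := (pvValues_nodup_iff hf).mpr hj
        rw [if_neg (show ¬((PySem.Set.ofList (pvLast PySem.Dict.empty ps).values).length ≠
            (pvLast PySem.Dict.empty ps).size) from by
          rw [PySem.Set.ofList_eq_self_of_nodup _ hvnd]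
          simp [hvs])]
        have hany : (ps.any fun p => !((pvLast PySem.Dict.empty ps).get? p.1 == some p.2)) = false := by
          rw [List.any_eq_false]
          intro p hp
          simp [pvLast_get hf p hp]
        rw [hany]
        simp only [Bool.false_eq_true, if_false]
        cases hw : word.toList with
        | nil => simp [pysem]
        | cons c0 w' =>
          cases hs : PySem.Int.toChars num with
          | nil =>
            rw [hw, hs] at hlenL
            simp at hlenL
          | cons d0 s' =>
            have hget0 : PySem.List.pyGet? (c0 :: w') 0 = some c0 := by simp [pysem]
            rw [hget0]
            have hpmem : (String.ofList [c0], String.ofList [d0]) ∈ ps := by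
              rw [hps, hw, hs]
              exact List.mem_map_of_mem (List.mem_cons_self ..)
            have hgd : (pvLast PySem.Dict.empty ps).get? (String.ofList [c0]) = some (String.ofList [d0]) :=
              pvLast_get hf _ hpmem
            simp only [hgd, PySem.Dict.getD_eq_get?_getD, Option.getD_some]
      · -- not injective: A fails the reverse-dict check, B the distinct-values check
        have hA : pvAloop ps PySem.Dict.empty PySem.Dict.empty = none := by
          cases ha : pvAloop ps PySem.Dict.empty PySem.Dict.empty with
          | none => rfl
          | some r => exact absurd (pvAloop_good hinv ha).2.2.2 hj
        rw [hA]
        have hvnd : ¬ (pvLast PySem.Dict.empty ps).values.Nodup := fun hn =>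
          hj ((pvValues_nodup_iff hf).mp hn)
        rw [if_pos (show (PySem.Set.ofList (pvLast PySem.Dict.empty ps).values).length ≠
            (pvLast PySem.Dict.empty ps).size from by
          rw [← hvs]
          intro he
          exact hvnd (pvOfList_len_iff.mp he))]
    · -- inconsistent: A fails the forward-dict check, B the membership check
      have hA : pvAloop ps PySem.Dict.empty PySem.Dict.empty = none := by
        cases ha : pvAloop ps PySem.Dict.empty PySem.Dict.empty with
        | none => rfl
        | some r => exact absurd (pvAloop_good hinv ha).2.2.1 hf
      rw [hA]
      have hany : (ps.any fun p => !((pvLast PySem.Dict.empty ps).get? p.1 == some p.2)) = true := by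
        by_contra hno
        apply hf
        have hall := List.any_eq_false.mp (eq_false_of_ne_true hno)
        have hgetall : ∀ p ∈ ps, (pvLast PySem.Dict.empty ps).get? p.1 = some p.2 := by
          intro p hp
          have := hall p hp
          simpa using this
        intro p hp q hq hpq
        have h1 := hgetall p hp
        have h2 := hgetall q hq
        rw [hpq, h2] at h1
        exact (Option.some.inj h1).symm
      by_cases hV : (PySem.Set.ofList (pvLast PySem.Dict.empty ps).values).length ≠
          (pvLast PySem.Dict.empty ps).size
      · rw [if_pos hV]
      · rw [if_neg hV, hany]
        simp

-- ===== VERDICT (by name: the statement is the Claim_ definition above) =====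
theorem make_mapping_spec : Claim_equal_make_mapping := by
  intro word num _
  unfold Spec_make_mapping
  exact pvMain word num
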